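-- pv_equiv track=rewrite | github.com/Marini97/datasage | datasage/report_formatter.py | merge_duplicate_sections
-- ===== SOURCE A (Python) =====
-- from typing import List, Dict, Any, Optional
--
-- def merge_duplicate_sections(all_sections: List[Dict[str, str]]) -> Dict[str, str]:
--     """Merge duplicate sections from multiple chunks.
--
--     Args:
--         all_sections: List of section dictionaries from different chunks
--
--     Returns:
--         Merged sections dictionary
--     """
--     merged = {}
--
--     # Priority order for sections
--     section_priorities = {
--         'dataset_overview': 1,
--         'executive_summary': 1,
--         'data_quality_summary': 2,
--         'data_quality_assessment': 2,
--         'column_profiles': 3,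
--         'recommendations': 4
--     }
--
--     for sections in all_sections:
--         for section_name, content in sections.items():
--             if not content.strip():
--                 continue
--
--             if section_name not in merged:
--                 merged[section_name] = content
--             else:
--                 # For overview sections, prefer the first (most complete) version
--                 if section_name in ['dataset_overview', 'executive_summary']:
--                     continue
--
--                 # For other sections, append unique content
--                 if section_name == 'column_profiles':
--                     # Combine column profiles
--                     merged[section_name] += '\n\n' + content
--                 elif section_name in ['data_quality_summary', 'data_quality_assessment']:
--                     # Merge quality summaries, avoiding duplicates
--                     existing_lines = set(merged[section_name].split('\n'))
--                     new_lines = [line for line in content.split('\n')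
--                                if line.strip() and line not in existing_lines]
--                     if new_lines:
--                         merged[section_name] += '\n' + '\n'.join(new_lines)
--
--     return merged
-- ===== SOURCE B (Python) =====
-- def merge_duplicate_sections(all_sections):
--     """Merge duplicate sections: group every non-empty content by section name
--     first, then reduce each group with its per-section merge rule."""
--     collected = {}
--     for sections in all_sections:
--         for name, content in sections.items():
--             if content.strip():
--                 collected.setdefault(name, []).append(content)
--     merged = {}
--     for name, contents in collected.items():
--         if name == 'column_profiles':
--             merged[name] = '\n\n'.join(contents)
--         elif name in ('data_quality_summary', 'data_quality_assessment'):
--             acc = contents[0]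
--             seen = set(acc.split('\n'))
--             for content in contents[1:]:
--                 new = [ln for ln in content.split('\n')
--                        if ln.strip() and ln not in seen]
--                 if new:
--                     acc += '\n' + '\n'.join(new)
--                     seen.update(new)
--             merged[name] = acc
--         else:
--             merged[name] = contents[0]
--     return merged
-- ===== Notes on version B (the rewrite author's own statement) =====
-- stated objective: alternative
-- what changed: A threads one merged dict through every (name, content) item, re-deriving the dedup line set from the accumulated string on each quality merge; B is a two-pass group-then-reduce: it first groups each section's non-empty contents by name in first-occurrence order, then applies one merge rule per section ('\n\n'.join for column_profiles, a fold with an explicitly maintained seen-line set for the quality sections, first content otherwise).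
import Mathlib
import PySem

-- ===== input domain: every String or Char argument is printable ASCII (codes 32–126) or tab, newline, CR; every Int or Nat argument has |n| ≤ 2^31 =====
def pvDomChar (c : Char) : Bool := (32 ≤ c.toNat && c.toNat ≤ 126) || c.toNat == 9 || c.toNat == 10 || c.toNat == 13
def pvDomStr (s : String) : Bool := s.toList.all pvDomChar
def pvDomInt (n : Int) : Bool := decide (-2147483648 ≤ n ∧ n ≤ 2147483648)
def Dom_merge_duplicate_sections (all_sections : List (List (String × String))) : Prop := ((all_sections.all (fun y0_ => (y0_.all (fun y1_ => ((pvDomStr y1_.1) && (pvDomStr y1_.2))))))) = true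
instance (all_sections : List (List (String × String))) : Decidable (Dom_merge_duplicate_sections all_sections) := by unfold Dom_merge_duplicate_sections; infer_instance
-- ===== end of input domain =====

-- B replaces A's single dict-threading pass by a two-pass group-then-reduce decomposition
-- (collect each section's non-empty contents, then apply the per-section merge rule once);
-- objective: alternative structure, same cost.

-- shared primitive: Python s.split('\n'); exact because the separator "\n" is non-empty
def pvSplitNL (s : String) : List String := (PySem.Str.split? s "\n").getD []

-- ===== PORT A =====
-- A's inner loop body: one (section_name, content) item against the running merged dict
def mergeStepA (merged : PySem.Dict String String) (p : String × String) : PySem.Dict String String :=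
  if PySem.Str.strip p.2 = "" then merged
  else
    match merged.get? p.1 with
    | none => merged.insert p.1 p.2
    | some old =>
      if p.1 = "dataset_overview" ∨ p.1 = "executive_summary" then merged
      else if p.1 = "column_profiles" then merged.insert p.1 (old ++ "\n\n" ++ p.2)
      else if p.1 = "data_quality_summary" ∨ p.1 = "data_quality_assessment" then
        let existing := PySem.Set.ofList (pvSplitNL old)
        let newLines := (pvSplitNL p.2).filter
          (fun l => !(PySem.Str.strip l == "") && !(existing.contains l))
        if newLines.isEmpty then merged
        else merged.insert p.1 (old ++ "\n" ++ PySem.Str.join "\n" newLines)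
      else merged

def merge_duplicate_sections (all_sections : List (List (String × String))) : List (String × String) :=
  (all_sections.foldl (fun merged sections => sections.foldl mergeStepA merged)
    PySem.Dict.empty).items

-- ===== PORT B =====
-- first pass: collected.setdefault(name, []).append(content) for every non-empty content
def collectStepB (c : PySem.Dict String (List String)) (p : String × String) :
    PySem.Dict String (List String) :=
  if PySem.Str.strip p.2 = "" then c else c.modify p.1 [] (· ++ [p.2])

-- quality reduce: fold later contents into (accumulated text, set of lines already present)
def qualityStepB (st : String × PySem.Set String) (content : String) : String × PySem.Set String :=
  let new := (pvSplitNL content).filter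
    (fun l => !(PySem.Str.strip l == "") && !(st.2.contains l))
  if new.isEmpty then st
  else (st.1 ++ "\n" ++ PySem.Str.join "\n" new, PySem.Set.update st.2 new)

-- second pass: one merge rule per section name, applied to the collected contents
def mergeRuleB (name first : String) (rest : List String) : String :=
  if name = "column_profiles" then PySem.Str.join "\n\n" (first :: rest)
  else if name = "data_quality_summary" ∨ name = "data_quality_assessment" then
    (rest.foldl qualityStepB (first, PySem.Set.ofList (pvSplitNL first))).1
  else first

def merge_duplicate_sections_alt (all_sections : List (List (String × String))) :
    List (String × String) :=
  let collected := all_sections.foldl (fun c sections => sections.foldl collectStepB c)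
    PySem.Dict.empty
  (collected.items.foldl (fun m p =>
      match p.2 with
      | [] => m            -- unreachable: collected values are always non-empty
      | first :: rest => m.insert p.1 (mergeRuleB p.1 first rest))
    PySem.Dict.empty).items

-- ===== PRECONDITION & SPEC =====
-- no Pre_: the equivalence holds for every association-list input

def Spec_merge_duplicate_sections (all_sections : List (List (String × String))) (out : List (String × String)) : Prop := out = merge_duplicate_sections_alt all_sections
instance (all_sections : List (List (String × String))) (out : List (String × String)) : Decidable (Spec_merge_duplicate_sections all_sections out) := by unfold Spec_merge_duplicate_sections; infer_instance

-- ===== CLAIM (what is proved, stated in full; the proofs are below) =====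
def Claim_equal_merge_duplicate_sections : Prop := ∀ (all_sections : List (List (String × String))), Dom_merge_duplicate_sections all_sections → Spec_merge_duplicate_sections all_sections (merge_duplicate_sections all_sections)

-- ===== LEMMAS AND PROOFS =====

-- A's else-branch as a two-argument combine (proof-side characterisation of A)
def combineA (name old c : String) : String :=
  if name = "dataset_overview" ∨ name = "executive_summary" then old
  else if name = "column_profiles" then old ++ "\n\n" ++ c
  else if name = "data_quality_summary" ∨ name = "data_quality_assessment" then
    let existing := PySem.Set.ofList (pvSplitNL old)
    let newLines := (pvSplitNL c).filter
      (fun l => !(PySem.Str.strip l == "") && !(existing.contains l))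
    if newLines.isEmpty then old else old ++ "\n" ++ PySem.Str.join "\n" newLines
  else old

def ruleA (name : String) : List String → String
  | [] => ""
  | f :: r => r.foldl (combineA name) f

def RelAC (A : PySem.Dict String String) (C : PySem.Dict String (List String)) : Prop :=
  A.items = C.items.map (fun q => (q.1, ruleA q.1 q.2)) ∧
  (∀ q ∈ C.items, q.2 ≠ []) ∧ C.keys.Nodup

-- ---- string lemmas: PySem.Chars.splitOn on a single-char separator is List.splitOn ----
theorem splitOn_go_eq (c : Char) (fuel : Nat) : ∀ (l cur : List Char) (acc : List (List Char)),
    l.length < fuel →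
    PySem.Chars.splitOn.go [c] fuel l cur acc
      = acc.reverse ++ (List.splitOn c l).modifyHead (cur.reverse ++ ·) := by
  induction fuel with
  | zero => intro l cur acc h; omega
  | succ fuel ih =>
    intro l cur acc h
    match l with
    | [] =>
      simp [PySem.Chars.splitOn.go, List.splitOn, List.splitOnP_nil]
    | c' :: rest =>
      simp only [PySem.Chars.splitOn.go]
      by_cases hc : c = c'
      · subst hc
        simp only [List.isPrefixOf, beq_self_eq_true, Bool.true_and,
          if_pos]
        rw [show List.drop [c].length (c :: rest) = rest from rfl,
          ih rest [] (cur.reverse :: acc) (by simpa using Nat.lt_of_succ_lt_succ h)]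
        simp [List.splitOn, List.splitOnP_cons]
        exact congrFun List.modifyHead_id _
      · have : [c].isPrefixOf (c' :: rest) = false := by
          simp [List.isPrefixOf]; exact fun h' => absurd h' hc
        rw [if_neg (by simp [this])]
        rw [ih rest (c' :: cur) acc (by simpa using Nat.lt_of_succ_lt_succ h)]
        simp [List.splitOn, List.splitOnP_cons, beq_iff_eq, Ne.symm hc,
          List.modifyHead_modifyHead, Function.comp_def]
theorem charsSplitOn_eq (s : List Char) (c : Char) :
    PySem.Chars.splitOn s [c] = List.splitOn c s := by
  rw [PySem.Chars.splitOn, splitOn_go_eq c (s.length+1) s [] [] (by omega)]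
  exact congrFun List.modifyHead_id _

theorem pvSplitNL_eq (s : String) :
    pvSplitNL s = (List.splitOn '\n' s.toList).map String.ofList := by
  simp [pvSplitNL, PySem.Str.split?, PySem.Chars.split?, charsSplitOn_eq,
    show "\n".toList = ['\n'] from rfl]

theorem not_mem_splitOn {c : Char} {s p : List Char} (hp : p ∈ List.splitOn c s) : c ∉ p := by
  rw [List.splitOn] at hp
  induction s generalizing p with
  | nil => simp [List.splitOnP_nil] at hp; simp [hp]
  | cons a s ih =>
    rw [List.splitOnP_cons] at hp
    by_cases ha : a = c
    · simp [ha] at hp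
      rcases hp with h | h
      · simp [h]
      · exact ih h
    · simp [ha] at hp
      rcases List.exists_cons_of_ne_nil (List.splitOnP_ne_nil (fun x => x == c) s) with ⟨h0, t0, ht⟩
      rw [ht] at hp
      simp at hp
      rcases hp with h | h
      · subst h
        intro hmem
        rcases List.mem_cons.mp hmem with h | h
        · exact ha h.symm
        · exact ih (by rw [ht]; exact List.mem_cons_self) h
      · exact ih (by rw [ht]; exact List.mem_cons_of_mem _ h) 

theorem not_mem_of_mem_pvSplitNL {s l : String} (hl : l ∈ pvSplitNL s) : '\n' ∉ l.toList := by
  rw [pvSplitNL_eq] at hl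
  rcases List.mem_map.mp hl with ⟨p, hp, rfl⟩
  rw [String.toList_ofList]
  exact not_mem_splitOn hp

theorem join_append_cons (c : Char) (l1 l2 : List (List Char)) (h1 : l1 ≠ []) (h2 : l2 ≠ []) :
    PySem.Chars.join [c] (l1 ++ l2)
      = PySem.Chars.join [c] l1 ++ c :: PySem.Chars.join [c] l2 := by
  induction l1 with
  | nil => exact absurd rfl h1
  | cons f r ih =>
    match r with
    | [] =>
      rcases List.exists_cons_of_ne_nil h2 with ⟨g, t, rfl⟩
      rw [show ([f] ++ g :: t) = f :: g :: t from rfl, PySem.Chars.join_cons_cons,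
        PySem.Chars.join_singleton]
      simp
    | h0 :: t0 =>
      rw [show ((f :: h0 :: t0) ++ l2) = f :: ((h0 :: t0) ++ l2) from rfl]
      rcases List.exists_cons_of_ne_nil (show (h0 :: t0) ++ l2 ≠ [] by simp) with ⟨g, t, ht⟩
      rw [ht, PySem.Chars.join_cons_cons, ← ht, ih (by simp), PySem.Chars.join_cons_cons]
      simp

theorem splitOn_ne_nil (c : Char) (s : List Char) : List.splitOn c s ≠ [] :=
  List.splitOnP_ne_nil _ s

theorem splitOn_append_join (c : Char) (a : List Char) (new : List (List Char))
    (hne : new ≠ []) (hfree : ∀ l ∈ new, c ∉ l) :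
    List.splitOn c (a ++ c :: PySem.Chars.join [c] new) = List.splitOn c a ++ new := by
  conv_lhs => rw [show a = [c].intercalate (List.splitOn c a) from (List.intercalate_splitOn a c).symm]
  rw [show ([c].intercalate (List.splitOn c a) ++ c :: PySem.Chars.join [c] new)
      = PySem.Chars.join [c] (List.splitOn c a ++ new) from by
    rw [join_append_cons c _ _ (splitOn_ne_nil c a) hne]
    rfl]
  rw [show PySem.Chars.join [c] (List.splitOn c a ++ new) = [c].intercalate (List.splitOn c a ++ new) from rfl]
  apply List.splitOn_intercalate
  · intro l hl
    rcases List.mem_append.mp hl with h | h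
    · exact not_mem_splitOn h
    · exact hfree l h
  · simp [hne]

theorem pvSplitNL_append (a : String) (new : List String) (hne : new ≠ [])
    (hfree : ∀ l ∈ new, '\n' ∉ l.toList) :
    pvSplitNL (a ++ "\n" ++ PySem.Str.join "\n" new) = pvSplitNL a ++ new := by
  rw [pvSplitNL_eq, pvSplitNL_eq]
  have htl : (a ++ "\n" ++ PySem.Str.join "\n" new).toList
      = a.toList ++ '\n' :: PySem.Chars.join ['\n'] (new.map String.toList) := by
    rw [String.toList_append, String.toList_append, PySem.Str.toList_join,
      show "\n".toList = ['\n'] from rfl, List.append_assoc]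
    rfl
  rw [htl, splitOn_append_join '\n' a.toList (new.map String.toList)
    (by simpa using hne) (by intro l hl; rcases List.mem_map.mp hl with ⟨x, hx, rfl⟩; exact hfree x hx)]
  rw [List.map_append, List.map_map]
  congr 1
  simp [Function.comp_def]

theorem ofList_append_update (xs ys : List String) :
    PySem.Set.ofList (xs ++ ys) = PySem.Set.update (PySem.Set.ofList xs) ys := by
  simp [PySem.Set.ofList, PySem.Set.update, List.foldl_append]

theorem toList_foldl_append (sep : String) (r : List String) (f : String) :
    (r.foldl (fun a c => a ++ sep ++ c) f).toList
      = (r.map String.toList).foldl (fun a c => a ++ sep.toList ++ c) f.toList := by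
  induction r generalizing f with
  | nil => rfl
  | cons x r ih => simp [List.foldl_cons, ih, String.toList_append]

theorem chars_join_fold (sep : List Char) (r : List (List Char)) (f : List Char) :
    PySem.Chars.join sep (f :: r) = r.foldl (fun a c => a ++ sep ++ c) f := by
  induction r generalizing f with
  | nil => exact PySem.Chars.join_singleton sep f
  | cons x r ih =>
    rw [PySem.Chars.join_cons_cons, ih, List.foldl_cons]
    have aux : ∀ (r : List (List Char)) (x y : List Char),
        r.foldl (fun a c => a ++ sep ++ c) (x ++ y) = x ++ r.foldl (fun a c => a ++ sep ++ c) y := by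
      intro r
      induction r with
      | nil => intro x y; rfl
      | cons z r ih2 =>
        intro x y
        simp only [List.foldl_cons]
        rw [show x ++ y ++ sep ++ z = x ++ (y ++ sep ++ z) from by simp, ih2]
    rw [show f ++ sep ++ x = (f ++ sep) ++ x from by simp, aux r (f ++ sep) x]

theorem joinStrFold (sep : String) (r : List String) (f : String) :
    PySem.Str.join sep (f :: r) = r.foldl (fun a c => a ++ sep ++ c) f := by
  have : (PySem.Str.join sep (f :: r)).toList = (r.foldl (fun a c => a ++ sep ++ c) f).toList := by
    rw [PySem.Str.toList_join, toList_foldl_append, List.map_cons, chars_join_fold]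
  calc PySem.Str.join sep (f :: r) = String.ofList (PySem.Str.join sep (f :: r)).toList := String.ofList_toList.symm
    _ = _ := by rw [this, String.ofList_toList]

-- one quality step: maintaining the seen set equals recomputing it from the accumulator
theorem qualityStep_eq (name : String)
    (hname : name = "data_quality_summary" ∨ name = "data_quality_assessment")
    (f c : String) :
    qualityStepB (f, PySem.Set.ofList (pvSplitNL f)) c
      = (combineA name f c, PySem.Set.ofList (pvSplitNL (combineA name f c))) := by
  have hcomb : combineA name f c =
      (let existing := PySem.Set.ofList (pvSplitNL f)
       let newLines := (pvSplitNL c).filter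
         (fun l => !(PySem.Str.strip l == "") && !(existing.contains l))
       if newLines.isEmpty then f else f ++ "\n" ++ PySem.Str.join "\n" newLines) := by
    rcases hname with rfl | rfl <;> simp [combineA]
  rw [hcomb]
  simp only [qualityStepB]
  set new := (pvSplitNL c).filter
    (fun l => !(PySem.Str.strip l == "") && !((PySem.Set.ofList (pvSplitNL f)).contains l)) with hnew
  by_cases he : new.isEmpty
  · simp [he]
  · simp only [he, if_neg, Bool.false_eq_true, not_false_iff, if_false]
    have hne : new ≠ [] := by
      intro h; rw [h] at he; exact he rfl
    have hfree : ∀ l ∈ new, '\n' ∉ l.toList := by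
      intro l hl
      exact not_mem_of_mem_pvSplitNL (List.mem_of_mem_filter (by rw [← hnew]; exact hl))
    rw [pvSplitNL_append f new hne hfree, ofList_append_update]

-- B's seen-set quality fold equals A's recompute-the-set fold
theorem qualityFold (name : String)
    (hname : name = "data_quality_summary" ∨ name = "data_quality_assessment")
    (r : List String) (f : String) :
    (r.foldl qualityStepB (f, PySem.Set.ofList (pvSplitNL f))).1
      = r.foldl (combineA name) f := by
  induction r generalizing f with
  | nil => rfl
  | cons c r ih =>
    simp only [List.foldl_cons]
    rw [qualityStep_eq name hname f c, ih]

theorem ruleB_eq_ruleA (name f : String) (r : List String) :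
    mergeRuleB name f r = ruleA name (f :: r) := by
  simp only [mergeRuleB, ruleA]
  by_cases hc : name = "column_profiles"
  · subst hc
    rw [if_pos rfl, joinStrFold]
    exact (PySem.List.foldl_congr_mem r _ _ f (by intro acc x _; simp [combineA])).symm
  · rw [if_neg hc]
    by_cases hq : name = "data_quality_summary" ∨ name = "data_quality_assessment"
    · rw [if_pos hq, qualityFold name hq]
    · rw [if_neg hq]
      have hid : ∀ acc x, combineA name acc x = acc := by
        intro acc x
        unfold combineA
        by_cases ho : name = "dataset_overview" ∨ name = "executive_summary"
        · rw [if_pos ho]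
        · rw [if_neg ho, if_neg hc, if_neg hq]
      rw [PySem.List.foldl_congr_mem r (combineA name) (fun a _ => a) f
        (by intro acc x _; exact hid acc x), List.foldl_fixed]

-- ---- the single-item invariant step ----
-- abbreviation used only in the proofs below
def ruleF (q : String × List String) : String × String := (q.1, ruleA q.1 q.2)

theorem find?_map_ruleF (k : String) (l : List (String × List String)) :
    List.find? (fun q => q.1 == k) (l.map ruleF)
      = (List.find? (fun q => q.1 == k) l).map ruleF := by
  rw [List.find?_map]
  rfl

theorem relAC_step (A : PySem.Dict String String) (C : PySem.Dict String (List String))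
    (p : String × String) (h : RelAC A C) : RelAC (mergeStepA A p) (collectStepB C p) := by
  obtain ⟨h1, h2, h3⟩ := h
  obtain ⟨k, c⟩ := p
  have h1' : A.items = C.items.map ruleF := h1
  unfold mergeStepA collectStepB
  by_cases hs : PySem.Str.strip c = ""
  · rw [if_pos hs, if_pos hs]
    exact ⟨h1, h2, h3⟩
  rw [if_neg hs, if_neg hs]
  simp only
  cases hCk : C.get? k with
  | none =>
    have hCc : C.contains k = false := (PySem.Dict.get?_eq_none_iff_contains C k).mp hCk
    have hfind : List.find? (fun q => q.1 == k) C.items = none := by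
      have := hCk
      unfold PySem.Dict.get? at this
      exact Option.map_eq_none_iff.mp this
    have hAnone : A.get? k = none := by
      unfold PySem.Dict.get?
      rw [h1', find?_map_ruleF, hfind]
      rfl
    have hAc : A.contains k = false := by
      rw [PySem.Dict.contains_eq_isSome_get?, hAnone]
      rfl
    rw [hAnone]
    simp only [PySem.Dict.modify, PySem.Dict.getD_of_not_contains C [] hCc, List.nil_append]
    refine ⟨?_, ?_, PySem.Dict.nodup_keys_insert C k [c] h3⟩
    · rw [PySem.Dict.items_insert_of_not_contains A c hAc,
        PySem.Dict.items_insert_of_not_contains C [c] hCc, h1', List.map_append]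
      rfl
    · intro q hq
      rw [PySem.Dict.items_insert_of_not_contains C [c] hCc] at hq
      rcases List.mem_append.mp hq with hq | hq
      · exact h2 q hq
      · simp only [List.mem_singleton] at hq
        rw [hq]
        simp
  | some cs =>
    have hmem : (k, cs) ∈ C.items := PySem.Dict.mem_items_of_get?_eq_some C hCk
    have hcs_ne : cs ≠ [] := h2 (k, cs) hmem
    have hCc : C.contains k = true := by
      rw [PySem.Dict.contains_eq_isSome_get?, hCk]
      rfl
    obtain ⟨q0, hf0, hq01, hq02⟩ :
        ∃ q0, List.find? (fun q : String × List String => q.1 == k) C.items = some q0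
          ∧ q0.1 = k ∧ q0.2 = cs := by
      have := hCk
      unfold PySem.Dict.get? at this
      cases hf : List.find? (fun q : String × List String => q.1 == k) C.items with
      | none => rw [hf] at this; exact absurd this (by simp)
      | some q0 =>
        rw [hf] at this
        refine ⟨q0, rfl, ?_, by simpa using this⟩
        have := List.find?_some hf
        exact beq_iff_eq.mp this
    have hAget : A.get? k = some (ruleA k cs) := by
      unfold PySem.Dict.get?
      rw [h1', find?_map_ruleF, hf0]
      simp [ruleF, hq01, hq02]
    have hAc : A.contains k = true := by
      rw [PySem.Dict.contains_eq_isSome_get?, hAget]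
      rfl
    have huniq : ∀ q ∈ C.items, q.1 = k → q.2 = cs := by
      intro q hq hk1
      have hg := PySem.Dict.get?_of_mem_items C (k := q.1) (v := q.2) (by exact hq) h3
      rw [hk1, hCk] at hg
      exact (Option.some_inj.mp hg).symm
    have hrule_app : ruleA k (cs ++ [c]) = combineA k (ruleA k cs) c := by
      rcases List.exists_cons_of_ne_nil hcs_ne with ⟨f0, r0, rfl⟩
      simp only [ruleA, List.cons_append, List.foldl_append, List.foldl_cons, List.foldl_nil]
    -- the collected dict after this item
    have hCmod : C.modify k [] (· ++ [c]) = C.insert k (cs ++ [c]) := by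
      simp only [PySem.Dict.modify, PySem.Dict.getD_of_get?_eq_some C [] hCk]
    have hC'items : (C.insert k (cs ++ [c])).items
        = C.items.map (fun q => if q.1 == k then (k, cs ++ [c]) else q) :=
      PySem.Dict.items_insert_of_contains C (cs ++ [c]) hCc
    -- B-side items after the step, expressed as an in-place update of A.items
    have hkey : (C.items.map (fun q => if q.1 == k then (k, cs ++ [c]) else q)).map
          (fun q => (q.1, ruleA q.1 q.2))
        = A.items.map (fun p => if p.1 == k then (k, combineA k (ruleA k cs) c) else p) := by
      rw [h1, List.map_map, List.map_map]
      refine List.map_congr_left ?_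
      intro q hq
      by_cases hqk : q.1 = k
      · have hq2 : q.2 = cs := huniq q hq hqk
        simp [Function.comp_def, hqk, hq2, hrule_app]
      · simp [Function.comp_def, hqk]
    -- when A's branch leaves merged unchanged, combineA is the identity too
    have hnochange : ∀ (hval : combineA k (ruleA k cs) c = ruleA k cs),
        A.items = (C.items.map (fun q => if q.1 == k then (k, cs ++ [c]) else q)).map
          (fun q => (q.1, ruleA q.1 q.2)) := by
      intro hval
      rw [hkey, hval]
      conv_lhs => rw [h1]
      rw [h1, List.map_map]
      refine (List.map_congr_left ?_).symm
      intro q hq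
      by_cases hqk : q.1 = k
      · have hq2 : q.2 = cs := huniq q hq hqk
        simp [Function.comp_def, hqk, hq2]
      · simp [Function.comp_def, hqk]
    have hmemB : ∀ q ∈ (C.insert k (cs ++ [c])).items, q.2 ≠ [] := by
      intro q hq
      rw [hC'items] at hq
      rcases List.mem_map.mp hq with ⟨q', hq', rfl⟩
      by_cases hqk : q'.1 = k
      · simp [hqk]
      · simp only [hqk, beq_iff_eq, if_neg hqk]
        exact h2 q' hq'
    have hnodupB : (C.insert k (cs ++ [c])).keys.Nodup :=
      PySem.Dict.nodup_keys_insert C k (cs ++ [c]) h3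
    rw [hAget]
    simp only
    rw [hCmod]
    -- now case on the section name, matching A's branch order
    by_cases hov : k = "dataset_overview" ∨ k = "executive_summary"
    · rw [if_pos hov]
      refine ⟨?_, hmemB, hnodupB⟩
      rw [hC'items]
      exact hnochange (by rcases hov with rfl | rfl <;> simp [combineA])
    rw [if_neg hov]
    by_cases hcol : k = "column_profiles"
    · rw [if_pos hcol]
      refine ⟨?_, hmemB, hnodupB⟩
      rw [hC'items, hkey, PySem.Dict.items_insert_of_contains A _ hAc]
      have hv : combineA k (ruleA k cs) c = ruleA k cs ++ "\n\n" ++ c := by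
        subst hcol; simp [combineA]
      rw [hv]
    rw [if_neg hcol]
    by_cases hq : k = "data_quality_summary" ∨ k = "data_quality_assessment"
    · rw [if_pos hq]
      have hv : combineA k (ruleA k cs) c
          = (let existing := PySem.Set.ofList (pvSplitNL (ruleA k cs))
             let newLines := (pvSplitNL c).filter
               (fun l => !(PySem.Str.strip l == "") && !(existing.contains l))
             if newLines.isEmpty then ruleA k cs
             else ruleA k cs ++ "\n" ++ PySem.Str.join "\n" newLines) := by
        rcases hq with rfl | rfl <;> simp [combineA]
      simp only at hv ⊢
      by_cases he : ((pvSplitNL c).filter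
          (fun l => !(PySem.Str.strip l == "")
            && !((PySem.Set.ofList (pvSplitNL (ruleA k cs))).contains l))).isEmpty
      · rw [if_pos he]
        refine ⟨?_, hmemB, hnodupB⟩
        rw [hC'items]
        exact hnochange (by rw [hv]; simp only [he, if_pos])
      · rw [if_neg he]
        refine ⟨?_, hmemB, hnodupB⟩
        rw [hC'items, hkey, PySem.Dict.items_insert_of_contains A _ hAc, hv]
        simp only [he, Bool.false_eq_true, if_false]
    · rw [if_neg hq]
      refine ⟨?_, hmemB, hnodupB⟩
      rw [hC'items]
      refine hnochange ?_
      unfold combineA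
      rw [if_neg hov, if_neg hcol, if_neg hq]

theorem relAC_foldl (ps : List (String × String)) (A : PySem.Dict String String)
    (C : PySem.Dict String (List String)) (h : RelAC A C) :
    RelAC (ps.foldl mergeStepA A) (ps.foldl collectStepB C) := by
  induction ps generalizing A C with
  | nil => exact h
  | cons q ps ih => exact ih _ _ (relAC_step A C q h)

theorem alt_items (C : PySem.Dict String (List String))
    (h2 : ∀ q ∈ C.items, q.2 ≠ []) (h3 : C.keys.Nodup) :
    (C.items.foldl (fun m p =>
        match p.2 with
        | [] => m
        | first :: rest => m.insert p.1 (mergeRuleB p.1 first rest))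
      (PySem.Dict.empty : PySem.Dict String String)).items
      = C.items.map (fun q => (q.1, ruleA q.1 q.2)) := by
  rw [PySem.List.foldl_congr_mem C.items _
    (fun m p => m.insert p.1 (match p.2 with | [] => "" | f :: r => mergeRuleB p.1 f r)) _
    (by
      intro m q hq
      obtain ⟨k0, v0⟩ := q
      cases v0 with
      | nil => exact absurd rfl (h2 (k0, []) hq)
      | cons f r => rfl)]
  refine Eq.trans (PySem.Dict.items_foldl_insert_fresh C.items Prod.fst
    (fun p => match p.2 with | [] => "" | f :: r => mergeRuleB p.1 f r) PySem.Dict.empty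
    (by intro a _; exact PySem.Dict.contains_empty (ν := String) a.1)
    (by simpa [PySem.Dict.keys] using h3)) ?_
  rw [show (PySem.Dict.empty : PySem.Dict String String).items = [] from rfl, List.nil_append]
  refine List.map_congr_left ?_
  intro q hq
  obtain ⟨k0, v0⟩ := q
  cases v0 with
  | nil => exact absurd rfl (h2 (k0, []) hq)
  | cons f r =>
    show (k0, mergeRuleB k0 f r) = (k0, ruleA k0 (f :: r))
    rw [ruleB_eq_ruleA]

-- ===== VERDICT (by name: the statement is the Claim_ definition above) =====
theorem merge_duplicate_sections_spec : Claim_equal_merge_duplicate_sections := by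
  intro all_sections _
  unfold Spec_merge_duplicate_sections
  unfold merge_duplicate_sections merge_duplicate_sections_alt
  rw [show (fun (merged : PySem.Dict String String) sections =>
        List.foldl mergeStepA merged sections) = (fun b l => List.foldl mergeStepA b l) from rfl]
  rw [← List.foldl_flatten (f := mergeStepA), ← List.foldl_flatten (f := collectStepB)]
  have h := relAC_foldl all_sections.flatten PySem.Dict.empty PySem.Dict.empty
    ⟨rfl, by intro q hq; simp [PySem.Dict.empty] at hq, PySem.Dict.nodup_keys_empty⟩
  obtain ⟨h1, h2, h3⟩ := h
  rw [alt_items _ h2 h3, h1]
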